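-- pv_equiv track=rewrite | github.com/mthomas46/Hackathon | phase2_comprehensive_discovery.py | _categorize_endpoint
-- ===== SOURCE A (Python) =====
-- from typing import Dict, List, Any, Optional
--
-- def _categorize_endpoint(path: str, method: str, details: Dict) -> str:
--     """Categorize an endpoint for LangGraph tool classification"""
--     path_lower = path.lower()
--     summary_lower = details.get("summary", "").lower()
--
--     # Analysis tools
--     if any(word in path_lower for word in ["analyze", "analysis", "process", "validate"]):
--         return "analysis"
--
--     # CRUD operations
--     if method.upper() == "GET" and not any(word in path_lower for word in ["search", "query"]):
--         return "read"
--     elif method.upper() == "POST":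
--         return "create"
--     elif method.upper() == "PUT":
--         return "update"
--     elif method.upper() == "DELETE":
--         return "delete"
--
--     # Search and query
--     if any(word in path_lower for word in ["search", "query", "find"]):
--         return "search"
--
--     # Management
--     if any(word in path_lower for word in ["manage", "admin", "config"]):
--         return "management"
--
--     # Integration
--     if any(word in path_lower for word in ["github", "jira", "confluence", "external"]):
--         return "integration"
--
--     # Security
--     if any(word in path_lower for word in ["secure", "auth", "permission", "scan"]):
--         return "security"
--
--     # Storage
--     if any(word in path_lower for word in ["store", "save", "retrieve", "document"]):
--         return "storage"
--
--     return "utility"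
-- ===== SOURCE B (Python) =====
-- RANKED = [
--     ("analyze", 0), ("analysis", 0), ("process", 0), ("validate", 0),
--     ("search", 1), ("query", 1), ("find", 1),
--     ("manage", 2), ("admin", 2), ("config", 2),
--     ("github", 3), ("jira", 3), ("confluence", 3), ("external", 3),
--     ("secure", 4), ("auth", 4), ("permission", 4), ("scan", 4),
--     ("store", 5), ("save", 5), ("retrieve", 5), ("document", 5),
-- ]
--
-- LABELS = ["analysis", "search", "management", "integration", "security", "storage", "utility"]
--
--
-- def _categorize_endpoint(path: str, method: str, details) -> str:
--     p = path.lower()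
--     # one pass over a flat ranked keyword table: keep the best (smallest) matched
--     # category rank, and whether a 'search'/'query' keyword matched (for the GET rule)
--     best = 6
--     sq = False
--     for w, r in RANKED:
--         if w in p:
--             best = min(best, r)
--             sq = sq or w in ("search", "query")
--     if best == 0:
--         return LABELS[0]
--     m = method.upper()
--     if m == "GET" and not sq:
--         return "read"
--     if m == "POST":
--         return "create"
--     if m == "PUT":
--         return "update"
--     if m == "DELETE":
--         return "delete"
--     return LABELS[best]
-- ===== Notes on version B (the rewrite author's own statement) =====
-- stated objective: alternative
-- what changed: Instead of A's ordered cascade of per-category any() substring checks, B makes one pass over a flat ranked (keyword, rank) table accumulating the minimum matched category rank and a search/query flag, then resolves the label from that rank via a labels array; the method dispatch is interposed on the accumulated state and the dead summary_lower computation is dropped.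
import Mathlib
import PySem

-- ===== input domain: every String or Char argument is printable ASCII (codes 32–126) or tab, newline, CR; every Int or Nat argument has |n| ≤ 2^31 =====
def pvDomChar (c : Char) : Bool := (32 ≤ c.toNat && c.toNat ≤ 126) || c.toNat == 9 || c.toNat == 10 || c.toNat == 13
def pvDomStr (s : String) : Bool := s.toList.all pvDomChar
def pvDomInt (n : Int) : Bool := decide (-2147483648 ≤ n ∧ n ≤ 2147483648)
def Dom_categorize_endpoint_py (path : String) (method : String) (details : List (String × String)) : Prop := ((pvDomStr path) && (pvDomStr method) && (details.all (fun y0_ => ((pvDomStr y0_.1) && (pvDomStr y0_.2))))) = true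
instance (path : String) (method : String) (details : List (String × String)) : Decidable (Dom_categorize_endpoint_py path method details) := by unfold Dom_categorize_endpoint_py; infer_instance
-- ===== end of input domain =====

-- B replaces A's per-category if-any cascade by ONE pass over a flat ranked keyword table
-- that accumulates the minimum matched category rank (plus a search/query flag), then
-- resolves the category from that rank (objective: alternative decomposition).

-- ===== PORT A =====
def categorize_endpoint_py (path : String) (method : String) (details : List (String × String)) : String :=
  let path_lower := PySem.Str.lower path
  let _summary_lower := PySem.Str.lower ((PySem.Dict.mk details).getD "summary" "")
  if ["analyze", "analysis", "process", "validate"].any (fun w => PySem.Str.isIn w path_lower) then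
    "analysis"
  else if PySem.Str.upper method == "GET"
      && !(["search", "query"].any (fun w => PySem.Str.isIn w path_lower)) then
    "read"
  else if PySem.Str.upper method == "POST" then
    "create"
  else if PySem.Str.upper method == "PUT" then
    "update"
  else if PySem.Str.upper method == "DELETE" then
    "delete"
  else if ["search", "query", "find"].any (fun w => PySem.Str.isIn w path_lower) then
    "search"
  else if ["manage", "admin", "config"].any (fun w => PySem.Str.isIn w path_lower) then
    "management"
  else if ["github", "jira", "confluence", "external"].any (fun w => PySem.Str.isIn w path_lower) then
    "integration"
  else if ["secure", "auth", "permission", "scan"].any (fun w => PySem.Str.isIn w path_lower) then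
    "security"
  else if ["store", "save", "retrieve", "document"].any (fun w => PySem.Str.isIn w path_lower) then
    "storage"
  else
    "utility"

-- ===== PORT B =====
-- Source B's RANKED flat keyword table
def pvRanked : List (String × Nat) :=
  [("analyze", 0), ("analysis", 0), ("process", 0), ("validate", 0),
   ("search", 1), ("query", 1), ("find", 1),
   ("manage", 2), ("admin", 2), ("config", 2),
   ("github", 3), ("jira", 3), ("confluence", 3), ("external", 3),
   ("secure", 4), ("auth", 4), ("permission", 4), ("scan", 4),
   ("store", 5), ("save", 5), ("retrieve", 5), ("document", 5)]

-- Source B's LABELS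
def pvLabels : List String :=
  ["analysis", "search", "management", "integration", "security", "storage", "utility"]

-- one iteration of Source B's loop body over the state (best, sq)
def pvStep (p : String) (st : Nat × Bool) (e : String × Nat) : Nat × Bool :=
  if PySem.Str.isIn e.1 p then
    (min st.1 e.2, st.2 || (e.1 == "search" || e.1 == "query"))
  else st

def categorize_endpoint_py_alt (path : String) (method : String) (details : List (String × String)) : String :=
  let p := PySem.Str.lower path
  let st := List.foldl (pvStep p) (6, false) pvRanked
  -- LABELS[0] / LABELS[best]: the index is always 0 ≤ best ≤ 6 < 7, so getD is exact here
  if st.1 == 0 then pvLabels.getD 0 ""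
  else
    let m := PySem.Str.upper method
    if m == "GET" && !st.2 then "read"
    else if m == "POST" then "create"
    else if m == "PUT" then "update"
    else if m == "DELETE" then "delete"
    else pvLabels.getD st.1 ""

-- ===== PRECONDITION & SPEC =====
def Spec_categorize_endpoint_py (path : String) (method : String) (details : List (String × String)) (out : String) : Prop := out = categorize_endpoint_py_alt path method details
instance (path : String) (method : String) (details : List (String × String)) (out : String) : Decidable (Spec_categorize_endpoint_py path method details out) := by unfold Spec_categorize_endpoint_py; infer_instance

-- ===== CLAIM (what is proved, stated in full; the proofs are below) =====
def Claim_equal_categorize_endpoint_py : Prop := ∀ (path : String) (method : String) (details : List (String × String)), Dom_categorize_endpoint_py path method details → Spec_categorize_endpoint_py path method details (categorize_endpoint_py path method details)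

-- ===== LEMMAS AND PROOFS =====

-- effect of the fold over each rank group, abstracted over the incoming state
theorem pv_g0 (p : String) (b : Nat) (s : Bool) :
    List.foldl (pvStep p) (b, s) [("analyze", 0), ("analysis", 0), ("process", 0), ("validate", 0)]
      = (if ["analyze", "analysis", "process", "validate"].any (fun w => PySem.Str.isIn w p) then min b 0 else b, s) := by
  simp only [List.foldl, pvStep]
  by_cases h1 : PySem.Str.isIn "analyze" p <;> by_cases h2 : PySem.Str.isIn "analysis" p <;>
    by_cases h3 : PySem.Str.isIn "process" p <;> by_cases h4 : PySem.Str.isIn "validate" p <;>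
    simp_all

theorem pv_g1 (p : String) (b : Nat) (s : Bool) :
    List.foldl (pvStep p) (b, s) [("search", 1), ("query", 1), ("find", 1)]
      = (if ["search", "query", "find"].any (fun w => PySem.Str.isIn w p) then min b 1 else b,
         s || ["search", "query"].any (fun w => PySem.Str.isIn w p)) := by
  simp only [List.foldl, pvStep]
  by_cases h1 : PySem.Str.isIn "search" p <;> by_cases h2 : PySem.Str.isIn "query" p <;>
    by_cases h3 : PySem.Str.isIn "find" p <;>
    simp_all

theorem pv_g2 (p : String) (b : Nat) (s : Bool) :
    List.foldl (pvStep p) (b, s) [("manage", 2), ("admin", 2), ("config", 2)]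
      = (if ["manage", "admin", "config"].any (fun w => PySem.Str.isIn w p) then min b 2 else b, s) := by
  simp only [List.foldl, pvStep]
  by_cases h1 : PySem.Str.isIn "manage" p <;> by_cases h2 : PySem.Str.isIn "admin" p <;>
    by_cases h3 : PySem.Str.isIn "config" p <;>
    simp_all

theorem pv_g3 (p : String) (b : Nat) (s : Bool) :
    List.foldl (pvStep p) (b, s) [("github", 3), ("jira", 3), ("confluence", 3), ("external", 3)]
      = (if ["github", "jira", "confluence", "external"].any (fun w => PySem.Str.isIn w p) then min b 3 else b, s) := by
  simp only [List.foldl, pvStep]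
  by_cases h1 : PySem.Str.isIn "github" p <;> by_cases h2 : PySem.Str.isIn "jira" p <;>
    by_cases h3 : PySem.Str.isIn "confluence" p <;> by_cases h4 : PySem.Str.isIn "external" p <;>
    simp_all

theorem pv_g4 (p : String) (b : Nat) (s : Bool) :
    List.foldl (pvStep p) (b, s) [("secure", 4), ("auth", 4), ("permission", 4), ("scan", 4)]
      = (if ["secure", "auth", "permission", "scan"].any (fun w => PySem.Str.isIn w p) then min b 4 else b, s) := by
  simp only [List.foldl, pvStep]
  by_cases h1 : PySem.Str.isIn "secure" p <;> by_cases h2 : PySem.Str.isIn "auth" p <;>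
    by_cases h3 : PySem.Str.isIn "permission" p <;> by_cases h4 : PySem.Str.isIn "scan" p <;>
    simp_all

theorem pv_g5 (p : String) (b : Nat) (s : Bool) :
    List.foldl (pvStep p) (b, s) [("store", 5), ("save", 5), ("retrieve", 5), ("document", 5)]
      = (if ["store", "save", "retrieve", "document"].any (fun w => PySem.Str.isIn w p) then min b 5 else b, s) := by
  simp only [List.foldl, pvStep]
  by_cases h1 : PySem.Str.isIn "store" p <;> by_cases h2 : PySem.Str.isIn "save" p <;>
    by_cases h3 : PySem.Str.isIn "retrieve" p <;> by_cases h4 : PySem.Str.isIn "document" p <;>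
    simp_all

-- characterization of the whole fold: best = first matching category rank, sq = search/query flag
set_option maxRecDepth 8000 in
set_option maxHeartbeats 1000000 in
theorem pv_scan_char (p : String) :
    List.foldl (pvStep p) (6, false) pvRanked
      = (if ["analyze", "analysis", "process", "validate"].any (fun w => PySem.Str.isIn w p) then 0
         else if ["search", "query", "find"].any (fun w => PySem.Str.isIn w p) then 1
         else if ["manage", "admin", "config"].any (fun w => PySem.Str.isIn w p) then 2
         else if ["github", "jira", "confluence", "external"].any (fun w => PySem.Str.isIn w p) then 3
         else if ["secure", "auth", "permission", "scan"].any (fun w => PySem.Str.isIn w p) then 4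
         else if ["store", "save", "retrieve", "document"].any (fun w => PySem.Str.isIn w p) then 5
         else 6,
         ["search", "query"].any (fun w => PySem.Str.isIn w p)) := by
  have e : pvRanked
      = [("analyze", 0), ("analysis", 0), ("process", 0), ("validate", 0)]
        ++ [("search", 1), ("query", 1), ("find", 1)]
        ++ [("manage", 2), ("admin", 2), ("config", 2)]
        ++ [("github", 3), ("jira", 3), ("confluence", 3), ("external", 3)]
        ++ [("secure", 4), ("auth", 4), ("permission", 4), ("scan", 4)]
        ++ [("store", 5), ("save", 5), ("retrieve", 5), ("document", 5)] := rfl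
  rw [e]
  rw [List.foldl_append, List.foldl_append, List.foldl_append, List.foldl_append, List.foldl_append]
  rw [pv_g0, pv_g1, pv_g2, pv_g3, pv_g4, pv_g5]
  cases hc0 : ["analyze", "analysis", "process", "validate"].any (fun w => PySem.Str.isIn w p) <;>
  cases hc1 : ["search", "query", "find"].any (fun w => PySem.Str.isIn w p) <;>
  cases hc2 : ["manage", "admin", "config"].any (fun w => PySem.Str.isIn w p) <;>
  cases hc3 : ["github", "jira", "confluence", "external"].any (fun w => PySem.Str.isIn w p) <;>
  cases hc4 : ["secure", "auth", "permission", "scan"].any (fun w => PySem.Str.isIn w p) <;>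
  cases hc5 : ["store", "save", "retrieve", "document"].any (fun w => PySem.Str.isIn w p) <;>
  simp

-- the two decision procedures agree once the keyword tests are abstracted into Bools
theorem pv_tree (m : String) (a0 a1 a2 a3 a4 a5 sq : Bool) :
    (if a0 then "analysis"
     else if (m == "GET") && !sq then "read"
     else if m == "POST" then "create"
     else if m == "PUT" then "update"
     else if m == "DELETE" then "delete"
     else if a1 then "search"
     else if a2 then "management"
     else if a3 then "integration"
     else if a4 then "security"
     else if a5 then "storage"
     else "utility")
    = (if (if a0 then 0
           else if a1 then 1
           else if a2 then 2
           else if a3 then 3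
           else if a4 then 4
           else if a5 then 5
           else 6 : Nat) == 0 then pvLabels.getD 0 ""
       else if (m == "GET") && !sq then "read"
       else if m == "POST" then "create"
       else if m == "PUT" then "update"
       else if m == "DELETE" then "delete"
       else pvLabels.getD
         (if a0 then 0
          else if a1 then 1
          else if a2 then 2
          else if a3 then 3
          else if a4 then 4
          else if a5 then 5
          else 6 : Nat) "") := by
  cases a0 <;> cases a1 <;> cases a2 <;> cases a3 <;> cases a4 <;> cases a5 <;> cases sq <;> rfl

-- ===== VERDICT (by name: the statement is the Claim_ definition above) =====
theorem categorize_endpoint_py_spec : Claim_equal_categorize_endpoint_py := by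
  intro path method details _
  show categorize_endpoint_py path method details = categorize_endpoint_py_alt path method details
  unfold categorize_endpoint_py categorize_endpoint_py_alt
  simp only [pv_scan_char]
  exact pv_tree (PySem.Str.upper method)
    (["analyze", "analysis", "process", "validate"].any (fun w => PySem.Str.isIn w (PySem.Str.lower path)))
    (["search", "query", "find"].any (fun w => PySem.Str.isIn w (PySem.Str.lower path)))
    (["manage", "admin", "config"].any (fun w => PySem.Str.isIn w (PySem.Str.lower path)))
    (["github", "jira", "confluence", "external"].any (fun w => PySem.Str.isIn w (PySem.Str.lower path)))
    (["secure", "auth", "permission", "scan"].any (fun w => PySem.Str.isIn w (PySem.Str.lower path)))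
    (["store", "save", "retrieve", "document"].any (fun w => PySem.Str.isIn w (PySem.Str.lower path)))
    (["search", "query"].any (fun w => PySem.Str.isIn w (PySem.Str.lower path)))
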